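-- pv_equiv track=rewrite | github.com/qLeviathan/bushido_engineering | mcp-phi-base/workers/validation/validation_worker.py | _is_well_formed
-- ===== SOURCE A (Python) =====
-- def _is_well_formed(equation: str) -> bool:
--     """Check if equation is well-formed"""
--     # Basic syntax checks
--     if not equation or '=' not in equation:
--         return False
--
--     # Balanced parentheses
--     paren_count = 0
--     for char in equation:
--         if char == '(':
--             paren_count += 1
--         elif char == ')':
--             paren_count -= 1
--         if paren_count < 0:
--             return False
--
--     return paren_count == 0
-- ===== SOURCE B (Python) =====
-- def _is_well_formed(equation: str) -> bool:
--     """Check if equation is well-formed"""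
--     if not equation or '=' not in equation:
--         return False
--
--     # Balanced parentheses by fixpoint rewriting: keep only the parentheses,
--     # then repeatedly cancel adjacent matched open-close pairs until none
--     # remain.  The string is balanced exactly when the residue is empty (a
--     # non-empty residue is some closers followed by some openers, never balanced).
--     s = ''.join(c for c in equation if c == '(' or c == ')')
--     while '()' in s:
--         s = s.replace('()', '')
--     return s == ''
-- ===== Notes on version B (the rewrite author's own statement) =====
-- stated objective: alternative
-- what changed: Replaced A's stateful counter scan with early exit by a string-rewriting fixpoint: keep only the parentheses and repeatedly delete adjacent matched open-close pairs with str.replace until none remain; the equation is balanced iff the residue is empty.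
import Mathlib
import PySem

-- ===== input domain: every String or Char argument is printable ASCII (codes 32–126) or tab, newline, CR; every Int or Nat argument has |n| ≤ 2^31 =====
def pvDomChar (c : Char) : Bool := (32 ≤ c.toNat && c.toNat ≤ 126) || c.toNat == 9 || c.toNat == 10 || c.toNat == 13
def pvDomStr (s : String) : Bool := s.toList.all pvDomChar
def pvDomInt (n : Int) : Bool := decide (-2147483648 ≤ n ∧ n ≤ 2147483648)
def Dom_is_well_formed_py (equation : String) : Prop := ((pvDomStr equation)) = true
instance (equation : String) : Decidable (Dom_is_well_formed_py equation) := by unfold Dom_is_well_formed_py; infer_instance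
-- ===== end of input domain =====

-- B replaces A's early-exit counter scan by a rewriting fixpoint (repeatedly delete adjacent matched open-close pairs); alternative algorithm, speed not claimed.

-- ===== PORT A =====
-- A's for-loop with early return: structural recursion over the characters carrying paren_count.
def pvALoop : List Char → Int → Bool
  | [], n => n == 0
  | c :: cs, n =>
      let n' := if c == '(' then n + 1 else if c == ')' then n - 1 else n
      if n' < 0 then false else pvALoop cs n'

def is_well_formed_py (equation : String) : Bool :=
  if equation.toList = [] || !(equation.toList.contains '=') then false
  else pvALoop equation.toList 0

-- ===== PORT B =====
-- B's while-loop (replace matched pairs while any remain); the fuel argument only makes the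
-- loop total in Lean (each iteration strictly shortens s, so length+1 fuel is never exhausted).
def pvReduce : Nat → List Char → List Char
  | 0, s => s
  | f+1, s =>
      if PySem.Chars.isIn ['(', ')'] s
      then pvReduce f (PySem.Chars.replace s ['(', ')'] [])
      else s

def is_well_formed_py_alt (equation : String) : Bool :=
  if equation.toList = [] || !(equation.toList.contains '=') then false
  else
    let s := equation.toList.filter (fun c => c == '(' || c == ')')
    pvReduce (s.length + 1) s == []

-- ===== PRECONDITION & SPEC =====
def Spec_is_well_formed_py (equation : String) (out : Bool) : Prop := out = is_well_formed_py_alt equation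
instance (equation : String) (out : Bool) : Decidable (Spec_is_well_formed_py equation out) := by unfold Spec_is_well_formed_py; infer_instance

-- ===== CLAIM (what is proved, stated in full; the proofs are below) =====
def Claim_equal_is_well_formed_py : Prop := ∀ (equation : String), Dom_is_well_formed_py equation → Spec_is_well_formed_py equation (is_well_formed_py equation)

-- ===== LEMMAS AND PROOFS =====

-- One left-to-right pass deleting non-overlapping occurrences of an open-close pair: the pure shape of B's str.replace call.
def remPairs : List Char → List Char
  | '(' :: ')' :: t => remPairs t
  | c :: t => c :: remPairs t
  | [] => []

theorem remPairs_pair (t : List Char) : remPairs ('(' :: ')' :: t) = remPairs t := rfl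
theorem remPairs_single (c : Char) : remPairs [c] = [c] := by
  rw [remPairs.eq_def]; split <;> simp_all [remPairs]
theorem remPairs_cons₂ (c c2 : Char) (t : List Char) (h : ¬(c = '(' ∧ c2 = ')')) :
    remPairs (c :: c2 :: t) = c :: remPairs (c2 :: t) := by
  rw [remPairs.eq_def]; split <;> simp_all
theorem remPairs_cons' (c : Char) (t : List Char)
    (h : ∀ t1, c = '(' → t = ')' :: t1 → False) : remPairs (c :: t) = c :: remPairs t := by
  cases t with
  | nil => exact remPairs_single c
  | cons c2 t2 =>
      exact remPairs_cons₂ _ _ _ (fun hp => h t2 hp.1 (by rw [hp.2]))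

theorem pv_remPairs_le (s : List Char) : (remPairs s).length ≤ s.length := by
  induction s using remPairs.induct with
  | case1 t ih => rw [remPairs_pair]; simp; omega
  | case2 c t h ih => rw [remPairs_cons' c t h]; simpa using ih
  | case3 => simp [remPairs]

theorem pv_remPairs_mem (s : List Char) (c : Char) (h : c ∈ remPairs s) : c ∈ s := by
  induction s using remPairs.induct with
  | case1 t ih => rw [remPairs_pair] at h; simp [ih h]
  | case2 c' t h' ih =>
      rw [remPairs_cons' c' t h'] at h
      rcases List.mem_cons.mp h with h | h
      · simp [h]
      · simp [ih h]
  | case3 => simp [remPairs] at h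

theorem pv_remPairs_lt (s : List Char) (h : PySem.Chars.isIn ['(', ')'] s = true) :
    (remPairs s).length < s.length := by
  rw [PySem.Chars.isIn_iff_infix] at h
  induction s using remPairs.induct with
  | case1 t ih =>
      rw [remPairs_pair]
      have := pv_remPairs_le t
      simp; omega
  | case2 c t hne ih =>
      rcases List.infix_cons_iff.mp h with hp | hi
      · rcases hp with ⟨r, hr⟩
        obtain ⟨h1, h2⟩ : c = '(' ∧ t = ')' :: r := by
          have := hr.symm
          simp at this
          exact ⟨this.1, this.2⟩
        exact (hne r h1 h2).elim
      · rw [remPairs_cons' c t hne]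
        simpa using ih hi
  | case3 => simp at h

theorem pv_loop_remPairs (s : List Char) (n : Int) (hn : 0 ≤ n) :
    pvALoop s n = pvALoop (remPairs s) n := by
  induction s using remPairs.induct generalizing n with
  | case1 t ih =>
      rw [remPairs_pair]
      have h1 : ¬ (n + 1 < 0) := by omega
      have h2 : ¬ (n + 1 - 1 < 0) := by omega
      have e2 : ¬ ((')' : Char) = '(') := by decide
      simp only [pvALoop]
      simp [h1]
      have h0 : ¬ (n < 0) := by omega
      simp [h0]
      exact ih n hn
  | case2 c t hne ih =>
      rw [remPairs_cons' c t hne]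
      simp only [pvALoop]
      by_cases hlt : (if c == '(' then n + 1 else if c == ')' then n - 1 else n) < 0
      · simp only [if_pos hlt]
      · simp only [if_neg hlt]
        exact ih _ (le_of_not_gt hlt)
  | case3 => rfl

theorem pv_loop_filter (s : List Char) (n : Int) (hn : 0 ≤ n) :
    pvALoop s n = pvALoop (s.filter (fun c => c == '(' || c == ')')) n := by
  induction s generalizing n with
  | nil => rfl
  | cons c t ih =>
      simp only [List.filter_cons]
      by_cases hp : (c == '(' || c == ')') = true
      · rw [if_pos hp]
        simp only [pvALoop]
        by_cases hlt : (if c == '(' then n + 1 else if c == ')' then n - 1 else n) < 0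
        · simp only [if_pos hlt]
        · simp only [if_neg hlt]
          exact ih _ (le_of_not_gt hlt)
      · rw [if_neg hp]
        simp only [Bool.or_eq_true] at hp
        rw [not_or] at hp
        simp only [pvALoop, hp.1, hp.2, Bool.false_eq_true, if_false]
        rw [if_neg (show ¬ (n < 0) from by omega)]
        exact ih _ hn

theorem pv_go_eq (f : Nat) (l acc : List Char) (h : l.length ≤ f) :
    PySem.Chars.replace.go ['(', ')'] [] f l acc = acc.reverse ++ remPairs l := by
  induction f generalizing l acc with
  | zero =>
      rw [List.length_eq_zero_iff.mp (Nat.le_zero.mp h)]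
      simp [PySem.Chars.replace.go, remPairs]
  | succ f ih =>
      cases l with
      | nil => simp [PySem.Chars.replace.go, remPairs]
      | cons c t =>
        rw [PySem.Chars.replace.go]
        simp only [List.length_cons] at h
        by_cases hc : c = '('
        · subst hc
          cases t with
          | nil =>
              simp only [List.isPrefixOf, BEq.rfl]
              simp only [Bool.and_false, Bool.false_eq_true, if_false]
              rw [ih [] ('(' :: acc) (Nat.zero_le f)]
              simp [remPairs]
          | cons c2 t2 =>
              by_cases hc2 : c2 = ')'
              · subst hc2
                simp only [List.isPrefixOf, BEq.rfl, Bool.and_true, if_true]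
                simp only [List.length_cons] at h
                simp only [List.reverse_nil, List.nil_append]
                rw [show List.drop ['(', ')'].length ('(' :: ')' :: t2) = t2 from rfl]
                rw [ih t2 acc (by omega)]
                rw [remPairs_pair]
              · have hpre : List.isPrefixOf ['(', ')'] ('(' :: c2 :: t2) = false := by
                  simp [List.isPrefixOf, Ne.symm hc2]
                rw [hpre]
                simp only [Bool.false_eq_true, if_false]
                rw [ih (c2 :: t2) ('(' :: acc) (by simpa using h)]
                rw [remPairs_cons₂ _ _ _ (fun hp => hc2 hp.2)]
                simp
        · have hpre : List.isPrefixOf ['(', ')'] (c :: t) = false := by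
            simp [List.isPrefixOf, Ne.symm hc]
          rw [hpre]
          simp only [Bool.false_eq_true, if_false]
          rw [ih t (c :: acc) (by omega)]
          have hrp : remPairs (c :: t) = c :: remPairs t := by
            cases t with
            | nil => exact remPairs_single c
            | cons c2 t2 => exact remPairs_cons₂ _ _ _ (fun hp => hc hp.1)
          rw [hrp]; simp

theorem pv_replace_eq (s : List Char) :
    PySem.Chars.replace s ['(', ')'] [] = remPairs s := by
  simp [PySem.Chars.replace, pv_go_eq s.length s [] le_rfl]

theorem pv_open_only (s : List Char) (hall : ∀ c ∈ s, c = '(') (n : Int) (hn : 0 ≤ n) :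
    pvALoop s n = decide (n + s.length = 0) := by
  induction s generalizing n with
  | nil =>
      simp only [pvALoop, List.length_nil, Nat.cast_zero, add_zero]
      by_cases hn0 : n = 0
      · subst hn0; decide
      · simp [hn0]
  | cons c t ih =>
      have hc : c = '(' := hall c (List.mem_cons_self ..)
      subst hc
      simp only [pvALoop, BEq.rfl, if_true]
      rw [if_neg (show ¬ (n + 1 < 0) from by omega)]
      rw [ih (fun c hc => hall c (List.mem_cons_of_mem _ hc)) (n + 1) (by omega)]
      simp only [decide_eq_decide, List.length_cons]
      push_cast
      omega

theorem pv_open_chain (t : List Char) (hp : ∀ c ∈ t, c = '(' ∨ c = ')')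
    (h : ¬ (['(', ')'] <:+: ('(' :: t))) : ∀ x ∈ t, x = '(' := by
  induction t with
  | nil => simp
  | cons c2 t2 ih =>
      intro x hx
      have hc2 : c2 = '(' := by
        rcases hp c2 (List.mem_cons_self ..) with h' | h'
        · exact h'
        · exact absurd (by rw [h']; exact ⟨[], t2, rfl⟩) h
      rcases List.mem_cons.mp hx with h' | h'
      · rw [h', hc2]
      · subst hc2
        exact ih (fun c hc => hp c (List.mem_cons_of_mem _ hc))
          (fun hi => h (List.infix_cons_iff.mpr (Or.inr hi))) x h'

theorem pv_fixpoint (s : List Char) (hp : ∀ c ∈ s, c = '(' ∨ c = ')')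
    (h : PySem.Chars.isIn ['(', ')'] s = false) :
    pvALoop s 0 = (s == []) := by
  have hni : ¬ (['(', ')'] <:+: s) := fun hi => by
    rw [(PySem.Chars.isIn_iff_infix _ _).mpr hi] at h
    simp at h
  cases s with
  | nil => rfl
  | cons c t =>
      rcases hp c (List.mem_cons_self ..) with hc | hc
      · subst hc
        have hall : ∀ x ∈ ('(' :: t), x = '(' := by
          intro x hx
          rcases List.mem_cons.mp hx with h' | h'
          · exact h'
          · exact pv_open_chain t (fun c hc => hp c (List.mem_cons_of_mem _ hc)) hni x h'
        rw [pv_open_only _ hall 0 le_rfl]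
        simp
        omega
      · subst hc
        simp [pvALoop]

theorem pv_reduce_eq (f : Nat) (s : List Char) (hf : s.length < f)
    (hp : ∀ c ∈ s, c = '(' ∨ c = ')') :
    pvALoop s 0 = (pvReduce f s == []) := by
  induction f generalizing s with
  | zero => exact absurd hf (Nat.not_lt_zero _)
  | succ f ih =>
      simp only [pvReduce]
      by_cases h : PySem.Chars.isIn ['(', ')'] s = true
      · rw [if_pos h, pv_replace_eq, pv_loop_remPairs s 0 le_rfl]
        exact ih (remPairs s)
          (by have := pv_remPairs_lt s h; omega)
          (fun c hc => hp c (pv_remPairs_mem s c hc))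
      · rw [if_neg h]
        exact pv_fixpoint s hp (Bool.eq_false_iff.mpr h)

-- ===== VERDICT (by name: the statement is the Claim_ definition above) =====
theorem is_well_formed_py_spec : Claim_equal_is_well_formed_py := by
  intro equation _
  unfold Spec_is_well_formed_py is_well_formed_py is_well_formed_py_alt
  split
  · rfl
  · rw [pv_loop_filter _ 0 le_rfl]
    exact pv_reduce_eq _ _ (Nat.lt_succ_self _) (by
      intro c hc
      have := (List.mem_filter.mp hc).2
      simp at this
      tauto)
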